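-- pv_equiv track=rewrite | github.com/StarbirdTech/AI-Blueprints | test/py_utils/code_preprocessor.py | encapsulate_code
-- ===== SOURCE A (Python) =====
-- def encapsulate_code(nb_info, lines):
--     """
--     Encapsulate notebook code in a class with a run method.
--
--     Preserves imports and comments at the top level, then wraps the rest
--     of the code in a class with the specified name and a run() method.
--
--     Args:
--         nb_info (dict): Notebook information containing class_name
--         lines (list): List of code lines to encapsulate
--
--     Returns:
--         list: Modified lines with proper class encapsulation
--     """
--     new_lines = []
--     before_class = True
--     for line in lines:
--         if before_class:
--             if line.strip() == "" or line.strip()[0] == "#" or "import" in line: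
--                 new_lines.append(line)
--             else:
--                 new_lines.append("\n")
--                 new_lines.append(f"class {nb_info['class_name']}():\n")
--                 new_lines.append("  def run(self):\n")
--                 new_lines.append(f"    {line}\n")
--                 before_class = False
--         else:
--             new_lines.append(f"    {line}\n")
--     return new_lines
-- ===== SOURCE B (Python) =====
-- def encapsulate_code(nb_info, lines):
--     def _is_header(line):
--         s = line.strip()
--         return s == "" or s[0] == "#" or "import" in line
--
--     i = 0
--     n = len(lines)
--     while i < n and _is_header(lines[i]):
--         i += 1
--     if i == n:
--         return list(lines)
--     return (
--         lines[:i]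
--         + ["\n", f"class {nb_info['class_name']}():\n", "  def run(self):\n"]
--         + [f"    {l}\n" for l in lines[i:]]
--     )
-- ===== Notes on version B (the rewrite author's own statement) =====
-- stated objective: simpler
-- what changed: A's flag-carrying single pass over all lines is replaced by finding the split index of the first non-header line and concatenating three slices (headers, class/run literals, indented body).
import Mathlib
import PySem

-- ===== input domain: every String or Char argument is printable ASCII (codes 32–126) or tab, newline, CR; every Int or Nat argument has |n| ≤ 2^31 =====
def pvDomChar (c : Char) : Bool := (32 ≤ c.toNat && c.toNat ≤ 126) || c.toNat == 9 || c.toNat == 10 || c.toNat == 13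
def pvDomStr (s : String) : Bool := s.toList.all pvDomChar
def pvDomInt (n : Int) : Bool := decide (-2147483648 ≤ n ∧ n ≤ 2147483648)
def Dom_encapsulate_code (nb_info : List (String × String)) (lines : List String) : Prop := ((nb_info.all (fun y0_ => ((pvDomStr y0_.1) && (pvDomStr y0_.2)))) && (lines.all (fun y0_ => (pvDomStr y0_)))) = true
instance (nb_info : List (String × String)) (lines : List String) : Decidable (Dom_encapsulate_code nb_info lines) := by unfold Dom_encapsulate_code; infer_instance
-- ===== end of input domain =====

-- B replaces A's flag-carrying single pass by a find-the-split-then-emit-slices decomposition (objective: simpler).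

-- shared port of the Python expressions `line.strip() == "" or line.strip()[0] == "#" or "import" in line`
-- and of the dict access nb_info['class_name'] (first matching key; total via getD, used only under Pre_)
def ecIsHeader (line : String) : Bool :=
  PySem.Str.strip line == "" || PySem.Str.pyGet? (PySem.Str.strip line) 0 == some '#'
    || PySem.Str.isIn "import" line

def ecClassName (nb_info : List (String × String)) : String :=
  ((nb_info.find? (fun p => p.1 == "class_name")).map Prod.snd).getD ""

-- ===== PORT A =====
-- loop state: (new_lines, before_class)
def ecStepA (nb_info : List (String × String)) (st : List String × Bool) (line : String) :
    List String × Bool :=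
  if st.2 then
    if ecIsHeader line then (st.1 ++ [line], true)
    else (st.1 ++ ["\n", "class " ++ ecClassName nb_info ++ "():\n", "  def run(self):\n",
                   "    " ++ line ++ "\n"], false)
  else (st.1 ++ ["    " ++ line ++ "\n"], false)

def encapsulate_code (nb_info : List (String × String)) (lines : List String) : List String :=
  (lines.foldl (ecStepA nb_info) ([], true)).1

-- ===== PORT B =====
def encapsulate_code_alt (nb_info : List (String × String)) (lines : List String) : List String :=
  match lines.dropWhile ecIsHeader with
  | [] => lines
  | rest =>
    lines.takeWhile ecIsHeader
      ++ ["\n", "class " ++ ecClassName nb_info ++ "():\n", "  def run(self):\n"]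
      ++ rest.map (fun l => "    " ++ l ++ "\n")

-- ===== PRECONDITION & SPEC =====
-- A (and B alike) raises KeyError when nb_info lacks 'class_name' and some non-header line exists;
-- Pre_ admits exactly the inputs on which A returns.
def Pre_encapsulate_code (nb_info : List (String × String)) (lines : List String) : Prop :=
  (nb_info.find? (fun p => p.1 == "class_name")).isSome = true
    ∨ lines.all ecIsHeader = true
instance (nb_info : List (String × String)) (lines : List String) :
    Decidable (Pre_encapsulate_code nb_info lines) := by unfold Pre_encapsulate_code; infer_instance

def pvWitness_encapsulate_code : (List (String × String)) × List String :=
  ([("class_name", "Foo")], ["import os\n", "x = 1\n", "print(x)\n"])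

def Spec_encapsulate_code (nb_info : List (String × String)) (lines : List String) (out : List String) : Prop := out = encapsulate_code_alt nb_info lines
instance (nb_info : List (String × String)) (lines : List String) (out : List String) : Decidable (Spec_encapsulate_code nb_info lines out) := by unfold Spec_encapsulate_code; infer_instance

-- ===== CLAIM (what is proved, stated in full; the proofs are below) =====
def Claim_equal_encapsulate_code : Prop := ∀ (nb_info : List (String × String)) (lines : List String), Dom_encapsulate_code nb_info lines → Pre_encapsulate_code nb_info lines → Spec_encapsulate_code nb_info lines (encapsulate_code nb_info lines)

-- ===== LEMMAS AND PROOFS =====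

-- after the class header is emitted, A only appends the indented lines
theorem ecFoldA_false (nb_info : List (String × String)) :
    ∀ (ls acc : List String),
      ls.foldl (ecStepA nb_info) (acc, false) = (acc ++ ls.map (fun l => "    " ++ l ++ "\n"), false) := by
  intro ls
  induction ls with
  | nil => simp
  | cons l t ih =>
    intro acc
    simp only [List.foldl_cons, ecStepA, List.map_cons, Bool.false_eq_true, if_false]
    rw [ih (acc ++ ["    " ++ l ++ "\n"])]
    simp

-- while before_class holds, A's fold computes the slice decomposition of B
theorem ecFoldA_true (nb_info : List (String × String)) :
    ∀ (ls acc : List String),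
      (ls.foldl (ecStepA nb_info) (acc, true)).1 = acc ++ encapsulate_code_alt nb_info ls := by
  intro ls
  induction ls with
  | nil => simp [encapsulate_code_alt]
  | cons l t ih =>
    intro acc
    by_cases h : ecIsHeader l = true
    · simp only [List.foldl_cons, ecStepA, h, if_pos]
      rw [ih (acc ++ [l])]
      unfold encapsulate_code_alt
      simp only [List.dropWhile_cons, List.takeWhile_cons, h, if_pos]
      cases hd : t.dropWhile ecIsHeader with
      | nil =>
        have : t.takeWhile ecIsHeader = t := by
          have := List.takeWhile_append_dropWhile (p := ecIsHeader) (l := t)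
          rw [hd, List.append_nil] at this; exact this
        simp
      | cons r rs => simp
    · simp only [Bool.not_eq_true] at h
      simp only [List.foldl_cons, ecStepA, h, Bool.false_eq_true, if_false, if_true]
      rw [ecFoldA_false nb_info t]
      unfold encapsulate_code_alt
      simp [h]

-- ===== VERDICT (by name: the statement is the Claim_ definition above) =====
theorem encapsulate_code_spec : Claim_equal_encapsulate_code := by
  intro nb_info lines _ _
  unfold Spec_encapsulate_code encapsulate_code
  rw [ecFoldA_true nb_info lines []]
  simp
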